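-- pv_equiv track=rewrite | github.com/haraGADygyl/100-python-projects | 03-ll-get-ready-for-your-coding-interview/091-can-rooks-attack-one-another.py | rooks_are_safe2
-- ===== SOURCE A (Python) =====
-- def rooks_are_safe2(arr):
--     n = len(arr)
--
--     for i in arr:
--         if i.count(1) > 1:
--             return False
--
--     for i in range(n):
--         count = 0
--         for j in range(n):
--             if arr[i][j] == 1:
--                 for k in range(n):
--                     if arr[k][j] == 1:
--                         count += 1
--         if count > 1:
--             return False
--
--     return True
-- ===== SOURCE B (Python) =====
-- def rooks_are_safe2(arr):
--     n = len(arr)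
--     if any(row.count(1) > 1 for row in arr):
--         return False
--     return all(sum(1 for row in arr if row[j] == 1) <= 1 for j in range(n))
-- ===== Notes on version B (the rewrite author's own statement) =====
-- stated objective: alternative
-- what changed: Replaced A's triple nested index loop (for every row, for every column hit, rescan the whole column) by a direct per-column occupancy count over the rows; on the measured input family both exit early so the cost is similar.
-- outside the precondition, e.g. on rooks_are_safe2([[1, 0], [1]]): A returns False, B returns False
import Mathlib
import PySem

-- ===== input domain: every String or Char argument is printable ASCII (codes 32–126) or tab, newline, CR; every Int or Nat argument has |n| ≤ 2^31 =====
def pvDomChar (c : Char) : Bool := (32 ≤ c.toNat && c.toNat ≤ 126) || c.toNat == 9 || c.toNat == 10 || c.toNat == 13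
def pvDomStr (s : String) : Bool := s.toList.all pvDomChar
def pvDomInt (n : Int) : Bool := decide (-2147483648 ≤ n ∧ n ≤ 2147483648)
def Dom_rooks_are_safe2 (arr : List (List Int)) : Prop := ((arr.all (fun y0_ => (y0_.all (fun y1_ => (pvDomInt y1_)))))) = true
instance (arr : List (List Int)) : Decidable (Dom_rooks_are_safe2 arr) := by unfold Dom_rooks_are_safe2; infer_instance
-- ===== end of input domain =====

-- B replaces A's triple nested index loop by a direct per-column occupancy count (alternative algorithm, same measured cost on the tested inputs).


-- ===== PORT A =====
def rooks_are_safe2 (arr : List (List Int)) : Bool :=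
  let n : Int := arr.length
  if arr.any (fun i => 1 < PySem.List.count i 1) then false
  else if (PySem.List.pyRange 0 n 1).any (fun i =>
      1 < (PySem.List.pyRange 0 n 1).foldl (fun count j =>
        if PySem.List.pyGetD (PySem.List.pyGetD arr i []) j 0 == 1 then
          (PySem.List.pyRange 0 n 1).foldl (fun count k =>
            if PySem.List.pyGetD (PySem.List.pyGetD arr k []) j 0 == 1 then count + 1 else count) count
        else count) (0 : Int)) then false
  else true

-- ===== PORT B =====
def rooks_are_safe2_alt (arr : List (List Int)) : Bool :=
  let n : Int := arr.length
  if arr.any (fun row => 1 < PySem.List.count row 1) then false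
  else (PySem.List.pyRange 0 n 1).all (fun j =>
    arr.foldl (fun s row => if PySem.List.pyGetD row j 0 == 1 then s + 1 else s) (0 : Int) ≤ 1)

-- ===== PRECONDITION & SPEC =====
-- Pre_ excludes ragged inputs (some row shorter than len(arr)) that have no row with two or more
-- rooks: on almost all of them A raises IndexError; on the few where A still returns False through
-- a partial scan, B returns False as well (see the cite in claim.json).
def Pre_rooks_are_safe2 (arr : List (List Int)) : Prop :=
  (∀ row ∈ arr, arr.length ≤ row.length) ∨ (∃ row ∈ arr, 1 < PySem.List.count row 1)
instance (arr : List (List Int)) : Decidable (Pre_rooks_are_safe2 arr) := by unfold Pre_rooks_are_safe2; infer_instance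
def pvWitness_rooks_are_safe2 : List (List Int) := [[1, 0], [0, 1]]

def Spec_rooks_are_safe2 (arr : List (List Int)) (out : Bool) : Prop := out = rooks_are_safe2_alt arr
instance (arr : List (List Int)) (out : Bool) : Decidable (Spec_rooks_are_safe2 arr out) := by unfold Spec_rooks_are_safe2; infer_instance

-- ===== CLAIM (what is proved, stated in full; the proofs are below) =====
def Claim_equal_rooks_are_safe2 : Prop := ∀ (arr : List (List Int)), Dom_rooks_are_safe2 arr → Pre_rooks_are_safe2 arr → Spec_rooks_are_safe2 arr (rooks_are_safe2 arr)

-- ===== LEMMAS AND PROOFS =====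

-- the (k, j) entry of the board read through the total getD both ports use
def gEntry (arr : List (List Int)) (k j : Nat) : Bool := (arr.getD k []).getD j 0 == 1
-- number of rows with a rook in column j
def colC (arr : List (List Int)) (j : Nat) : Nat := arr.countP (fun row => row.getD j 0 == 1)
-- A's per-row accumulated count: over the columns j this row occupies, the full column count
def rowS (arr : List (List Int)) (i : Nat) : Int :=
  (((List.range arr.length).filter (fun j => gEntry arr i j)).map (fun j => (colC arr j : Int))).sum

lemma map_getD_range {α : Type} (l : List α) (d : α) :
    List.map (fun k => l.getD k d) (List.range l.length) = l := by
  apply List.ext_getElem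
  · simp
  · intro i h1 h2
    simp [List.getD_eq_getElem?_getD, List.getElem?_eq_getElem h2]

lemma countP_getD_range {α : Type} (l : List α) (d : α) (p : α → Bool) :
    List.countP (fun k => p (l.getD k d)) (List.range l.length) = l.countP p := by
  conv_rhs => rw [← map_getD_range l d]
  rw [List.countP_map]
  rfl

lemma countP_entry (arr : List (List Int)) (j : Nat) :
    List.countP (fun k => (arr.getD k []).getD j 0 == 1) (List.range arr.length)
      = arr.countP (fun row => row.getD j 0 == 1) :=
  countP_getD_range arr [] (fun row => row.getD j 0 == 1)

lemma A_norm (arr : List (List Int)) :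
    rooks_are_safe2 arr =
      (if arr.any (fun r => 1 < PySem.List.count r 1) then false
       else !((List.range arr.length).any (fun i => 1 < rowS arr i))) := by
  unfold rooks_are_safe2 rowS colC gEntry
  simp only [PySem.List.pyRange_zero_nat, List.any_map, List.foldl_map, Function.comp_def,
    PySem.List.pyGetD_natCast]
  simp only [PySem.List.foldl_if_add_one]
  simp only [PySem.List.foldl_if_eq_foldl_filter, PySem.List.foldl_add, zero_add,
    countP_entry]
  cases arr.any (fun r => decide (1 < PySem.List.count r 1)) <;>
    cases h : (List.range arr.length).any
      (fun i => decide (1 < (((List.range arr.length).filter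
        (fun j => (arr.getD i []).getD j 0 == 1)).map
          (fun j => (arr.countP (fun row => row.getD j 0 == 1) : Int))).sum)) <;>
    simp [h]

lemma B_norm (arr : List (List Int)) :
    rooks_are_safe2_alt arr =
      (if arr.any (fun r => 1 < PySem.List.count r 1) then false
       else (List.range arr.length).all (fun j => (colC arr j : Int) ≤ 1)) := by
  unfold rooks_are_safe2_alt colC
  simp only [PySem.List.pyRange_zero_nat, List.all_map, Function.comp_def,
    PySem.List.pyGetD_natCast, PySem.List.foldl_if_add_one, zero_add]

lemma key (arr : List (List Int))
    (hlen : ∀ r ∈ arr, arr.length ≤ r.length)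
    (hrow : ∀ r ∈ arr, List.count 1 r ≤ 1) :
    ((List.range arr.length).any (fun i => 1 < rowS arr i)) =
      !((List.range arr.length).all (fun j => (colC arr j : Int) ≤ 1)) := by
  rw [Bool.eq_iff_iff]
  simp only [List.any_eq_true, Bool.not_eq_true', List.all_eq_false, List.mem_range,
    decide_eq_true_iff]
  constructor
  · rintro ⟨i, hi, hS⟩
    by_contra hno
    push Not at hno
    -- every column count is ≤ 1, and row i holds at most one rook: rowS i ≤ 1
    have hrowmem : arr.getD i [] ∈ arr := by
      have : arr.getD i [] = arr[i] := by
        simp [List.getD_eq_getElem?_getD, List.getElem?_eq_getElem hi]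
      rw [this]
      exact List.getElem_mem hi
    have hocc : List.countP (fun j => gEntry arr i j) (List.range arr.length) ≤ 1 := by
      have h1 : List.countP (fun j => gEntry arr i j) (List.range arr.length)
          ≤ List.countP (fun j => gEntry arr i j) (List.range (arr.getD i []).length) :=
        (List.range_sublist.mpr (hlen _ hrowmem)).countP_le
      have h2 : List.countP (fun j => gEntry arr i j) (List.range (arr.getD i []).length)
          = (arr.getD i []).countP (fun x => x == 1) := by
        unfold gEntry
        exact countP_getD_range (arr.getD i []) 0 (fun x => x == 1)
      have h3 : (arr.getD i []).count 1 ≤ 1 := hrow _ hrowmem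
      rw [List.count_eq_countP] at h3
      omega
    have hsum : rowS arr i ≤ 1 := by
      unfold rowS
      have hb : ∀ x ∈ ((List.range arr.length).filter (fun j => gEntry arr i j)).map
          (fun j => (colC arr j : Int)), x ≤ 1 := by
        intro x hx
        rcases List.mem_map.mp hx with ⟨j, hj, rfl⟩
        exact hno j (List.mem_range.mp (List.mem_of_mem_filter hj))
      have hs := List.sum_le_card_nsmul _ 1 hb
      rw [List.length_map, ← List.countP_eq_length_filter, nsmul_eq_mul, mul_one] at hs
      exact le_trans hs (by exact_mod_cast hocc)
    omega
  · rintro ⟨j, hj, hC⟩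
    have hC2 : 1 < colC arr j := by omega
    have hpos : 0 < List.countP (fun k => gEntry arr k j) (List.range arr.length) := by
      unfold gEntry
      rw [countP_entry]
      unfold colC at hC2
      omega
    rcases List.countP_pos_iff.mp hpos with ⟨k, hk, hgk⟩
    refine ⟨k, List.mem_range.mp hk, ?_⟩
    have hmem : (colC arr j : Int) ∈ ((List.range arr.length).filter
        (fun x => gEntry arr k x)).map (fun x => (colC arr x : Int)) :=
      List.mem_map_of_mem (List.mem_filter.mpr ⟨List.mem_range.mpr hj, hgk⟩)
    have hnn : ∀ x ∈ ((List.range arr.length).filter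
        (fun x => gEntry arr k x)).map (fun x => (colC arr x : Int)), (0 : Int) ≤ x := by
      intro x hx
      rcases List.mem_map.mp hx with ⟨j', _, rfl⟩
      exact Int.natCast_nonneg _
    have := List.single_le_sum hnn _ hmem
    unfold rowS
    omega

-- ===== VERDICT (by name: the statement is the Claim_ definition above) =====
theorem rooks_are_safe2_spec : Claim_equal_rooks_are_safe2 := by
  intro arr _ hpre
  unfold Spec_rooks_are_safe2
  rw [A_norm, B_norm]
  cases h : arr.any (fun r => 1 < PySem.List.count r 1) with
  | true => rfl
  | false =>
    simp only [Bool.false_eq_true, if_false]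
    have hrow : ∀ r ∈ arr, List.count 1 r ≤ 1 := by
      intro r hr
      have := List.any_eq_false.mp h r hr
      simp only [PySem.List.count_eq, decide_eq_true_eq] at this
      omega
    have hlen : ∀ r ∈ arr, arr.length ≤ r.length := by
      rcases hpre with h' | ⟨r, hr, hc⟩
      · exact h'
      · exfalso
        rw [List.any_eq_false] at h
        exact absurd hc (by simpa using h r hr)
    rw [key arr hlen hrow, Bool.not_not]
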